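-- pv_equiv track=rewrite | github.com/Leob000/film_app | faklevr_scripts/small_faklevr_dataset_creation.py | generate_questions_answers
-- ===== SOURCE A (Python) =====
-- def generate_questions_answers(shapes):
--     """generate questions and answers based on the shapes in the image
--
--     Args:
--         shapes (list): list of shapes in the image (shape_type, color, coordinates)
--     """
--     questions_answers = []
--
--     # Questions :
--     # How many shapes are there?
--     # How many red shapes are there?
--     # How many rectangles are there?
--     # How many red rectangles are there?
--     questions_answers.append(("how many shapes are there", str(len(shapes))))
--     for color in ["red", "green", "blue"]:
--         count = sum(1 for shape in shapes if shape[1] == color)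
--         questions_answers.append((f"how many {color} shapes", str(count)))
--         for shape_type in ['rectangle', 'ellipse', 'triangle']:
--             count = sum(1 for shape in shapes if shape[0] == shape_type and shape[1] == color)
--             questions_answers.append((f"how many {color} {shape_type}s", str(count)))
--     for shape_type in ['rectangle', 'ellipse', 'triangle']:
--         count = sum(1 for shape in shapes if shape[0] == shape_type)
--         questions_answers.append((f"how many {shape_type}s", str(count)))
--
--     return(questions_answers)
-- ===== SOURCE B (Python) =====
-- def generate_questions_answers(shapes):
--     total = 0
--     color_counts = {}
--     type_counts = {}
--     pair_counts = {}
--     for shape in shapes: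
--         total += 1
--         color_counts[shape[1]] = color_counts.get(shape[1], 0) + 1
--         type_counts[shape[0]] = type_counts.get(shape[0], 0) + 1
--         key = (shape[1], shape[0])
--         pair_counts[key] = pair_counts.get(key, 0) + 1
--     qa = [("how many shapes are there", str(total))]
--     for color in ["red", "green", "blue"]:
--         qa.append((f"how many {color} shapes", str(color_counts.get(color, 0))))
--         for shape_type in ["rectangle", "ellipse", "triangle"]:
--             qa.append((f"how many {color} {shape_type}s", str(pair_counts.get((color, shape_type), 0))))
--     for shape_type in ["rectangle", "ellipse", "triangle"]:
--         qa.append((f"how many {shape_type}s", str(type_counts.get(shape_type, 0))))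
--     return qa
-- ===== Notes on version B (the rewrite author's own statement) =====
-- stated objective: alternative
-- what changed: Replaces A's 13 separate scans over shapes (one generator-sum per question) with a single counting pass building total/color/type/(color,type) dicts, then a data-independent emission pass looking each count up with default 0; asymptotically fewer passes but measured runtimes are comparable.
import Mathlib
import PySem

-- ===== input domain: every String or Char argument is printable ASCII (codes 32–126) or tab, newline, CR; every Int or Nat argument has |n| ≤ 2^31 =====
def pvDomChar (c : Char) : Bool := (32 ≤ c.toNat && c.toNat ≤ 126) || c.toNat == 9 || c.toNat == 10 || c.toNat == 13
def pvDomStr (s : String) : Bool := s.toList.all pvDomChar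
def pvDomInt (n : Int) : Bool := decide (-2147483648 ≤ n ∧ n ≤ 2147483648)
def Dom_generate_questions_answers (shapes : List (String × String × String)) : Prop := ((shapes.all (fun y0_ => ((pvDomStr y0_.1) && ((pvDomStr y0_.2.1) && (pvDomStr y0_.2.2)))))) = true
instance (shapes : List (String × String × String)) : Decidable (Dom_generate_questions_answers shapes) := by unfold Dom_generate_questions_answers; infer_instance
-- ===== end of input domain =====

-- B replaces A's 13 separate scans over `shapes` with one counting pass into dicts plus a fixed emission pass (objective: alternative; measured speed comparable).

-- ===== PORT A =====
def generate_questions_answers (shapes : List (String × String × String)) : List (String × String) :=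
  let questions_answers : List (String × String) := []
  let questions_answers := questions_answers ++ [("how many shapes are there", PySem.Int.toStr (shapes.length : Int))]
  let questions_answers := ["red", "green", "blue"].foldl (fun qa color =>
      let count : Int := shapes.foldl (fun acc shape => if shape.2.1 == color then acc + 1 else acc) 0
      let qa := qa ++ [("how many " ++ color ++ " shapes", PySem.Int.toStr count)]
      ["rectangle", "ellipse", "triangle"].foldl (fun qa shape_type =>
        let count : Int := shapes.foldl (fun acc shape => if shape.1 == shape_type && shape.2.1 == color then acc + 1 else acc) 0
        qa ++ [("how many " ++ color ++ " " ++ shape_type ++ "s", PySem.Int.toStr count)]) qa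
    ) questions_answers
  ["rectangle", "ellipse", "triangle"].foldl (fun qa shape_type =>
      let count : Int := shapes.foldl (fun acc shape => if shape.1 == shape_type then acc + 1 else acc) 0
      qa ++ [("how many " ++ shape_type ++ "s", PySem.Int.toStr count)]) questions_answers

-- ===== PORT B =====
-- one counting pass: (total, color_counts, type_counts, pair_counts)
def pvStateB := Int × PySem.Dict String Int × PySem.Dict String Int × PySem.Dict (String × String) Int

def pvCountStep (st : pvStateB) (shape : String × String × String) : pvStateB :=
  (st.1 + 1,
   st.2.1.insert shape.2.1 (st.2.1.getD shape.2.1 0 + 1),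
   st.2.2.1.insert shape.1 (st.2.2.1.getD shape.1 0 + 1),
   st.2.2.2.insert (shape.2.1, shape.1) (st.2.2.2.getD (shape.2.1, shape.1) 0 + 1))

def generate_questions_answers_alt (shapes : List (String × String × String)) : List (String × String) :=
  let st := shapes.foldl pvCountStep (0, PySem.Dict.empty, PySem.Dict.empty, PySem.Dict.empty)
  let total := st.1
  let color_counts := st.2.1
  let type_counts := st.2.2.1
  let pair_counts := st.2.2.2
  let qa : List (String × String) := [("how many shapes are there", PySem.Int.toStr total)]
  let qa := ["red", "green", "blue"].foldl (fun qa color =>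
      let qa := qa ++ [("how many " ++ color ++ " shapes", PySem.Int.toStr (color_counts.getD color 0))]
      ["rectangle", "ellipse", "triangle"].foldl (fun qa shape_type =>
        qa ++ [("how many " ++ color ++ " " ++ shape_type ++ "s", PySem.Int.toStr (pair_counts.getD (color, shape_type) 0))]) qa
    ) qa
  ["rectangle", "ellipse", "triangle"].foldl (fun qa shape_type =>
      qa ++ [("how many " ++ shape_type ++ "s", PySem.Int.toStr (type_counts.getD shape_type 0))]) qa

-- ===== PRECONDITION & SPEC =====
def Spec_generate_questions_answers (shapes : List (String × String × String)) (out : List (String × String)) : Prop := out = generate_questions_answers_alt shapes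
instance (shapes : List (String × String × String)) (out : List (String × String)) : Decidable (Spec_generate_questions_answers shapes out) := by unfold Spec_generate_questions_answers; infer_instance

-- ===== CLAIM (what is proved, stated in full; the proofs are below) =====
def Claim_equal_generate_questions_answers : Prop := ∀ (shapes : List (String × String × String)), Dom_generate_questions_answers shapes → Spec_generate_questions_answers shapes (generate_questions_answers shapes)

-- ===== LEMMAS AND PROOFS =====

-- the combined counting fold splits into its four independent components
theorem pv_fold_split (shapes : List (String × String × String)) (t : Int)
    (cc tc : PySem.Dict String Int) (pc : PySem.Dict (String × String) Int) :
    shapes.foldl pvCountStep (t, cc, tc, pc) =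
      (t + shapes.length,
       (shapes.map (fun s => s.2.1)).foldl (fun d x => d.insert x (d.getD x 0 + 1)) cc,
       (shapes.map (fun s => s.1)).foldl (fun d x => d.insert x (d.getD x 0 + 1)) tc,
       (shapes.map (fun s => (s.2.1, s.1))).foldl (fun d x => d.insert x (d.getD x 0 + 1)) pc) := by
  induction shapes generalizing t cc tc pc with
  | nil => simp
  | cons s rest ih =>
    simp only [List.foldl_cons, List.map_cons, pvCountStep, ih, List.length_cons]
    refine congrArg (fun z => (z, _)) ?_
    push_cast; ring

theorem pv_colorCount (shapes : List (String × String × String)) (c : String) :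
    ((shapes.foldl pvCountStep (0, PySem.Dict.empty, PySem.Dict.empty, PySem.Dict.empty)).2.1).getD c 0 =
      shapes.foldl (fun acc shape => if shape.2.1 == c then acc + 1 else acc) 0 := by
  rw [pv_fold_split, PySem.List.foldl_if_add_one]
  simp [PySem.Dict.getD_foldl_insert_add_one, List.count_eq_countP, List.countP_map, Function.comp_def]

theorem pv_typeCount (shapes : List (String × String × String)) (t : String) :
    ((shapes.foldl pvCountStep (0, PySem.Dict.empty, PySem.Dict.empty, PySem.Dict.empty)).2.2.1).getD t 0 =
      shapes.foldl (fun acc shape => if shape.1 == t then acc + 1 else acc) 0 := by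
  rw [pv_fold_split, PySem.List.foldl_if_add_one]
  simp [PySem.Dict.getD_foldl_insert_add_one, List.count_eq_countP, List.countP_map, Function.comp_def]

theorem pv_pairCount (shapes : List (String × String × String)) (c t : String) :
    ((shapes.foldl pvCountStep (0, PySem.Dict.empty, PySem.Dict.empty, PySem.Dict.empty)).2.2.2).getD (c, t) 0 =
      shapes.foldl (fun acc shape => if shape.1 == t && shape.2.1 == c then acc + 1 else acc) 0 := by
  rw [pv_fold_split, PySem.List.foldl_if_add_one]
  simp only [PySem.Dict.getD_foldl_insert_add_one, PySem.Dict.getD_empty, List.count_eq_countP,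
    List.countP_map, Function.comp_def, zero_add]
  congr 1
  refine List.countP_congr (fun s _ => ?_)
  simp [Prod.ext_iff, Bool.beq_eq_decide_eq, decide_eq_true_eq, and_comm]

theorem pv_totalCount (shapes : List (String × String × String)) :
    ((shapes.foldl pvCountStep (0, PySem.Dict.empty, PySem.Dict.empty, PySem.Dict.empty)).1) =
      (shapes.length : Int) := by
  rw [pv_fold_split]; exact zero_add _

-- ===== VERDICT (by name: the statement is the Claim_ definition above) =====
theorem generate_questions_answers_spec : Claim_equal_generate_questions_answers := by
  intro shapes _
  unfold Spec_generate_questions_answers generate_questions_answers generate_questions_answers_alt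
  simp only [List.foldl_cons, List.foldl_nil, List.nil_append,
    pv_totalCount, pv_colorCount, pv_typeCount, pv_pairCount]
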